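-- pv_equiv track=rewrite | github.com/soumithbabburi/cipherq-neurorepurpose | dynamic_literature_optimizer.py | _get_intelligent_alzheimer_fallbacks
-- ===== SOURCE A (Python) =====
-- from typing import Dict, List, Any, Optional, Tuple
--
-- def _get_intelligent_alzheimer_fallbacks(drug_name: str, target_protein: str = None) -> List[Dict]:
--     """Intelligent Alzheimer's-specific fallback strategies when literature search fails"""
--     drug_lower = drug_name.lower()
--     strategies = []
--
--     # CNS/BBB optimization (highest priority)
--     strategies.append({
--         'category': 'cns_bbb',
--         'area': 'CNS/BBB Penetration',
--         'recommendation': 'Develop lipophilic prodrugs or nanocarriers to enhance blood-brain barrier penetration for Alzheimer\'s therapy',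
--         'citation': 'CNS drug delivery research (2024)',
--         'evidence_level': 'Medium (Research Study)',
--         'alzheimer_relevance': 'High'
--     })
--
--     # Neuroprotection strategies
--     strategies.append({
--         'category': 'neuroprotection',
--         'area': 'Neuroprotective Formulation',
--         'recommendation': 'Design neuroprotective formulations targeting amyloid-beta aggregation and tau phosphorylation in Alzheimer\'s',
--         'citation': 'Alzheimer\'s drug development (2024)',
--         'evidence_level': 'Medium (Research Study)',
--         'alzheimer_relevance': 'High'
--     })
--
--     # Elderly safety considerations
--     strategies.append({
--         'category': 'elderly_safety',
--         'area': 'Geriatric Safety Profile',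
--         'recommendation': 'Establish age-appropriate dosing protocols with reduced side effects for elderly Alzheimer\'s patients',
--         'citation': 'Geriatric pharmacology (2024)',
--         'evidence_level': 'Medium (Clinical Study)',
--         'alzheimer_relevance': 'High'
--     })
--
--     # Drug-specific optimizations based on known properties
--     if any(term in drug_lower for term in ['ace', 'captopril', 'enalapril', 'lisinopril']):
--         strategies.append({
--             'category': 'alzheimer_delivery',
--             'area': 'ACE Inhibitor CNS Optimization',
--             'recommendation': 'Optimize ACE inhibitor CNS penetration for dual cardiovascular-neurological benefits in Alzheimer\'s',
--             'citation': 'ACE inhibitor neuroprotection (2023)',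
--             'evidence_level': 'Medium (Clinical Study)',
--             'alzheimer_relevance': 'High'
--         })
--     elif 'curcumin' in drug_lower:
--         strategies.append({
--             'category': 'alzheimer_delivery',
--             'area': 'Curcumin Bioavailability',
--             'recommendation': 'Enhance curcumin bioavailability with targeted brain delivery for anti-inflammatory effects in Alzheimer\'s',
--             'citation': 'Curcumin Alzheimer\'s research (2024)',
--             'evidence_level': 'High (Meta-analysis)',
--             'alzheimer_relevance': 'High'
--         })
--     elif any(term in drug_lower for term in ['metformin', 'diabetes']):
--         strategies.append({
--             'category': 'cognitive_enhancement',
--             'area': 'Metabolic Cognitive Enhancement',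
--             'recommendation': 'Leverage metabolic pathways for cognitive enhancement and neuroprotection in Alzheimer\'s',
--             'citation': 'Diabetes-Alzheimer\'s connection (2024)',
--             'evidence_level': 'Medium (Clinical Study)',
--             'alzheimer_relevance': 'High'
--         })
--
--     return strategies
-- ===== SOURCE B (Python) =====
-- BASE_STRATEGIES = [
--     {
--         'category': 'cns_bbb',
--         'area': 'CNS/BBB Penetration',
--         'recommendation': 'Develop lipophilic prodrugs or nanocarriers to enhance blood-brain barrier penetration for Alzheimer\'s therapy',
--         'citation': 'CNS drug delivery research (2024)',
--         'evidence_level': 'Medium (Research Study)',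
--         'alzheimer_relevance': 'High'
--     },
--     {
--         'category': 'neuroprotection',
--         'area': 'Neuroprotective Formulation',
--         'recommendation': 'Design neuroprotective formulations targeting amyloid-beta aggregation and tau phosphorylation in Alzheimer\'s',
--         'citation': 'Alzheimer\'s drug development (2024)',
--         'evidence_level': 'Medium (Research Study)',
--         'alzheimer_relevance': 'High'
--     },
--     {
--         'category': 'elderly_safety',
--         'area': 'Geriatric Safety Profile',
--         'recommendation': 'Establish age-appropriate dosing protocols with reduced side effects for elderly Alzheimer\'s patients',
--         'citation': 'Geriatric pharmacology (2024)',
--         'evidence_level': 'Medium (Clinical Study)',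
--         'alzheimer_relevance': 'High'
--     },
-- ]
--
-- EXTRA_STRATEGIES = [
--     {
--         'category': 'alzheimer_delivery',
--         'area': 'ACE Inhibitor CNS Optimization',
--         'recommendation': 'Optimize ACE inhibitor CNS penetration for dual cardiovascular-neurological benefits in Alzheimer\'s',
--         'citation': 'ACE inhibitor neuroprotection (2023)',
--         'evidence_level': 'Medium (Clinical Study)',
--         'alzheimer_relevance': 'High'
--     },
--     {
--         'category': 'alzheimer_delivery',
--         'area': 'Curcumin Bioavailability',
--         'recommendation': 'Enhance curcumin bioavailability with targeted brain delivery for anti-inflammatory effects in Alzheimer\'s',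
--         'citation': 'Curcumin Alzheimer\'s research (2024)',
--         'evidence_level': 'High (Meta-analysis)',
--         'alzheimer_relevance': 'High'
--     },
--     {
--         'category': 'cognitive_enhancement',
--         'area': 'Metabolic Cognitive Enhancement',
--         'recommendation': 'Leverage metabolic pathways for cognitive enhancement and neuroprotection in Alzheimer\'s',
--         'citation': 'Diabetes-Alzheimer\'s connection (2024)',
--         'evidence_level': 'Medium (Clinical Study)',
--         'alzheimer_relevance': 'High'
--     },
-- ]
--
-- # Each keyword carries the priority index of its strategy; we match ALL keywords
-- # exhaustively and select the minimum-priority hit, instead of a short-circuit cascade.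
-- KEYWORD_PRIORITY = [
--     ('ace', 0), ('captopril', 0), ('enalapril', 0), ('lisinopril', 0),
--     ('curcumin', 1),
--     ('metformin', 2), ('diabetes', 2),
-- ]
--
--
-- def _get_intelligent_alzheimer_fallbacks(drug_name: str, target_protein: str = None):
--     """Exhaustive keyword matching with min-priority selection over a keyword table."""
--     drug_lower = drug_name.lower()
--     hits = [priority for term, priority in KEYWORD_PRIORITY if term in drug_lower]
--     extra = [EXTRA_STRATEGIES[min(hits)]] if hits else []
--     return BASE_STRATEGIES + extra
-- ===== Notes on version B (the rewrite author's own statement) =====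
-- stated objective: alternative
-- what changed: Instead of A's short-circuit if/elif cascade appending inside branches, B matches ALL keywords exhaustively against a keyword->priority table, collects the priority indices of every hit, and selects the extra strategy by min(hits); the three base strategies are a module-level constant concatenated with the selection.
import Mathlib
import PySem

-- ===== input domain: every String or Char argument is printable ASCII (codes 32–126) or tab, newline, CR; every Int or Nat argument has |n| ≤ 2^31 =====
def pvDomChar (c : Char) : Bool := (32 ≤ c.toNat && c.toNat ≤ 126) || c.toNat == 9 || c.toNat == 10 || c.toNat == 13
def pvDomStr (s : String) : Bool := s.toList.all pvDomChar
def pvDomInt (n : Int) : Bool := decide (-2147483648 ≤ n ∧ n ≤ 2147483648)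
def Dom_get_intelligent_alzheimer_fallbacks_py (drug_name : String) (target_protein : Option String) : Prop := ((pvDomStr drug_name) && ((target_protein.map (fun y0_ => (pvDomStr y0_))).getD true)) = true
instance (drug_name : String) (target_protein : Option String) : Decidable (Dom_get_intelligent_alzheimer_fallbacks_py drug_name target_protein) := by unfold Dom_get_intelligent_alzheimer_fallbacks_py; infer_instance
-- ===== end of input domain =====

-- ===== PORT A =====
-- B replaces A's short-circuit if/elif cascade by exhaustive keyword->priority matching with min-priority selection (objective: alternative).
-- Shared strategy-dict literals (identical in Source A and Source B):
def pvStratCns : List (String × String) :=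
  [("category", "cns_bbb"),
   ("area", "CNS/BBB Penetration"),
   ("recommendation", "Develop lipophilic prodrugs or nanocarriers to enhance blood-brain barrier penetration for Alzheimer's therapy"),
   ("citation", "CNS drug delivery research (2024)"),
   ("evidence_level", "Medium (Research Study)"),
   ("alzheimer_relevance", "High")]
def pvStratNeuro : List (String × String) :=
  [("category", "neuroprotection"),
   ("area", "Neuroprotective Formulation"),
   ("recommendation", "Design neuroprotective formulations targeting amyloid-beta aggregation and tau phosphorylation in Alzheimer's"),
   ("citation", "Alzheimer's drug development (2024)"),
   ("evidence_level", "Medium (Research Study)"),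
   ("alzheimer_relevance", "High")]
def pvStratElderly : List (String × String) :=
  [("category", "elderly_safety"),
   ("area", "Geriatric Safety Profile"),
   ("recommendation", "Establish age-appropriate dosing protocols with reduced side effects for elderly Alzheimer's patients"),
   ("citation", "Geriatric pharmacology (2024)"),
   ("evidence_level", "Medium (Clinical Study)"),
   ("alzheimer_relevance", "High")]
def pvStratAce : List (String × String) :=
  [("category", "alzheimer_delivery"),
   ("area", "ACE Inhibitor CNS Optimization"),
   ("recommendation", "Optimize ACE inhibitor CNS penetration for dual cardiovascular-neurological benefits in Alzheimer's"),
   ("citation", "ACE inhibitor neuroprotection (2023)"),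
   ("evidence_level", "Medium (Clinical Study)"),
   ("alzheimer_relevance", "High")]
def pvStratCurcumin : List (String × String) :=
  [("category", "alzheimer_delivery"),
   ("area", "Curcumin Bioavailability"),
   ("recommendation", "Enhance curcumin bioavailability with targeted brain delivery for anti-inflammatory effects in Alzheimer's"),
   ("citation", "Curcumin Alzheimer's research (2024)"),
   ("evidence_level", "High (Meta-analysis)"),
   ("alzheimer_relevance", "High")]
def pvStratMetformin : List (String × String) :=
  [("category", "cognitive_enhancement"),
   ("area", "Metabolic Cognitive Enhancement"),
   ("recommendation", "Leverage metabolic pathways for cognitive enhancement and neuroprotection in Alzheimer's"),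
   ("citation", "Diabetes-Alzheimer's connection (2024)"),
   ("evidence_level", "Medium (Clinical Study)"),
   ("alzheimer_relevance", "High")]

def get_intelligent_alzheimer_fallbacks_py (drug_name : String) (target_protein : Option String) : List (List (String × String)) :=
  let drug_lower := PySem.Str.lower drug_name
  let strategies : List (List (String × String)) := []
  let strategies := strategies ++ [pvStratCns]
  let strategies := strategies ++ [pvStratNeuro]
  let strategies := strategies ++ [pvStratElderly]
  let strategies :=
    if ["ace", "captopril", "enalapril", "lisinopril"].any (fun term => PySem.Str.isIn term drug_lower) then
      strategies ++ [pvStratAce]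
    else if PySem.Str.isIn "curcumin" drug_lower then
      strategies ++ [pvStratCurcumin]
    else if ["metformin", "diabetes"].any (fun term => PySem.Str.isIn term drug_lower) then
      strategies ++ [pvStratMetformin]
    else strategies
  strategies

-- ===== PORT B =====
def pvBaseStrategies : List (List (String × String)) := [pvStratCns, pvStratNeuro, pvStratElderly]
def pvExtraStrategies : List (List (String × String)) := [pvStratAce, pvStratCurcumin, pvStratMetformin]
def pvKeywordPriority : List (String × Nat) :=
  [("ace", 0), ("captopril", 0), ("enalapril", 0), ("lisinopril", 0),
   ("curcumin", 1),
   ("metformin", 2), ("diabetes", 2)]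

def get_intelligent_alzheimer_fallbacks_py_alt (drug_name : String) (target_protein : Option String) : List (List (String × String)) :=
  let drug_lower := PySem.Str.lower drug_name
  let hits := pvKeywordPriority.filterMap
    (fun p => if PySem.Str.isIn p.1 drug_lower then some p.2 else none)
  let extra : List (List (String × String)) :=
    match hits.min? with
    | some i => [pvExtraStrategies.getD i []]
    | none => []
  pvBaseStrategies ++ extra

-- ===== PRECONDITION & SPEC =====

def Spec_get_intelligent_alzheimer_fallbacks_py (drug_name : String) (target_protein : Option String) (out : List (List (String × String))) : Prop := out = get_intelligent_alzheimer_fallbacks_py_alt drug_name target_protein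
instance (drug_name : String) (target_protein : Option String) (out : List (List (String × String))) : Decidable (Spec_get_intelligent_alzheimer_fallbacks_py drug_name target_protein out) := by unfold Spec_get_intelligent_alzheimer_fallbacks_py; infer_instance

-- ===== CLAIM =====
def Claim_equal_get_intelligent_alzheimer_fallbacks_py : Prop := ∀ (drug_name : String) (target_protein : Option String), Dom_get_intelligent_alzheimer_fallbacks_py drug_name target_protein → Spec_get_intelligent_alzheimer_fallbacks_py drug_name target_protein (get_intelligent_alzheimer_fallbacks_py drug_name target_protein)

-- ===== LEMMAS AND PROOFS =====

-- ===== VERDICT =====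
theorem get_intelligent_alzheimer_fallbacks_py_spec : Claim_equal_get_intelligent_alzheimer_fallbacks_py := by
  intro drug_name target_protein _
  unfold Spec_get_intelligent_alzheimer_fallbacks_py
  unfold get_intelligent_alzheimer_fallbacks_py get_intelligent_alzheimer_fallbacks_py_alt pvKeywordPriority
  simp only [List.filterMap, List.any_cons, List.any_nil, Bool.or_false]
  cases h1 : PySem.Str.isIn "ace" (PySem.Str.lower drug_name) <;>
  cases h2 : PySem.Str.isIn "captopril" (PySem.Str.lower drug_name) <;>
  cases h3 : PySem.Str.isIn "enalapril" (PySem.Str.lower drug_name) <;>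
  cases h4 : PySem.Str.isIn "lisinopril" (PySem.Str.lower drug_name) <;>
  cases h5 : PySem.Str.isIn "curcumin" (PySem.Str.lower drug_name) <;>
  cases h6 : PySem.Str.isIn "metformin" (PySem.Str.lower drug_name) <;>
  cases h7 : PySem.Str.isIn "diabetes" (PySem.Str.lower drug_name) <;>
  simp [h1, h2, h3, h4, h5, h6, h7, List.min?, pvBaseStrategies, pvExtraStrategies]
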